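-- pv_equiv track=rewrite | github.com/Morwenn/cpp-sort | tools/oddeven_mergesort.py | pairwise_merge
-- ===== SOURCE A (Python) =====
-- def pairwise_merge(lo, hi, r):
--     step = r * 2
--     if step < hi - lo:
--         yield from pairwise_merge(lo, hi, step)
--         yield from pairwise_merge(lo + r, hi - r, step)
--         for i in range(lo + r, hi - r + 1, step):
--             yield i, i + r
--     else:
--         pass
-- ===== SOURCE B (Python) =====
-- def pairwise_merge(lo, hi, r):
--     # Iterative post-order traversal with an explicit stack of tagged work items.
--     stack = [(True, lo, hi, r)]
--     while stack:
--         expand, a, b, s = stack.pop()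
--         if expand:
--             if s * 2 < b - a:
--                 stack.append((False, a, b, s))
--                 stack.append((True, a + s, b - s, s * 2))
--                 stack.append((True, a, b, s * 2))
--         else:
--             for i in range(a + s, b - s + 1, s * 2):
--                 yield i, i + s
-- ===== Notes on version B (the rewrite author's own statement) =====
-- stated objective: alternative
-- what changed: Replaced A's double recursion (two recursive yield-froms then an emit loop) by an iterative post-order traversal driven by an explicit LIFO stack of tagged expand/emit work items.
import Mathlib
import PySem

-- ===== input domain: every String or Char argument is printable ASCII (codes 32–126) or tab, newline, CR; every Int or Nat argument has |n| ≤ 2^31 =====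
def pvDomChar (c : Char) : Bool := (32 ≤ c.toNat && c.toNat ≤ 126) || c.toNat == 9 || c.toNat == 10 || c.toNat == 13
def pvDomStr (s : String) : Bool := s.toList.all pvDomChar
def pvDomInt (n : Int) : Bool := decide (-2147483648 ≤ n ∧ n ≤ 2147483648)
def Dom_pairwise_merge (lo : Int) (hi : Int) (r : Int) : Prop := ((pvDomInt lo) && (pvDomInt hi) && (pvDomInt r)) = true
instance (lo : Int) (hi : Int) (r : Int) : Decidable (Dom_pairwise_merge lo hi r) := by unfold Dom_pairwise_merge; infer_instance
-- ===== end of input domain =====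

-- B replaces A's double recursion (two recursive yield-froms, then an emit loop) by an
-- iterative post-order traversal driven by an explicit LIFO stack of tagged work items.

-- ===== PORT A =====
-- Fuel is only a totalizer: on inputs admitted by Pre_ the recursion measure (hi-lo-r).toNat
-- strictly decreases at each call, so the fuel (measure+1) is never exhausted and pmA is
-- exactly Python A's recursion; Python A recurses forever when r ≤ 0 and 2r < hi - lo
-- (excluded by Pre_).
def pmA : Nat → Int → Int → Int → List (Int × Int)
  | 0, _, _, _ => []
  | fuel + 1, lo, hi, r =>
    let step := r * 2
    if step < hi - lo then
      pmA fuel lo hi step ++ pmA fuel (lo + r) (hi - r) step ++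
        (PySem.List.pyRange (lo + r) (hi - r + 1) step).map (fun i => (i, i + r))
    else []

def pairwise_merge (lo : Int) (hi : Int) (r : Int) : List (Int × Int) :=
  pmA ((hi - lo - r).toNat + 1) lo hi r

-- ===== PORT B =====
-- a work item of B's explicit stack: expand = (True, a, b, s), emit = (False, a, b, s)
inductive PmItem : Type where
  | expand : Int → Int → Int → PmItem
  | emit : Int → Int → Int → PmItem

-- totalizer for the stack loop: with sufficient depth fuel, the exact number of iterations
-- ('pops') the loop performs on an expand item
def pmCost : Nat → Int → Int → Int → Nat
  | 0, _, _, _ => 0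
  | fuel + 1, a, b, s =>
    if s * 2 < b - a then pmCost fuel a b (s * 2) + pmCost fuel (a + s) (b - s) (s * 2) + 2
    else 1

-- the 'while stack:' loop of Source B (one fuel unit per pop; the Lean stack head is Python's
-- list end, the append/pop site)
def pmLoop : Nat → List PmItem → List (Int × Int) → List (Int × Int)
  | 0, _, acc => acc
  | _ + 1, [], acc => acc
  | fuel + 1, .expand a b s :: rest, acc =>
    if s * 2 < b - a then
      pmLoop fuel (.expand a b (s * 2) :: .expand (a + s) (b - s) (s * 2) :: .emit a b s :: rest) acc
    else pmLoop fuel rest acc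
  | fuel + 1, .emit a b s :: rest, acc =>
    pmLoop fuel rest (acc ++ (PySem.List.pyRange (a + s) (b - s + 1) (s * 2)).map (fun i => (i, i + s)))

def pairwise_merge_alt (lo : Int) (hi : Int) (r : Int) : List (Int × Int) :=
  pmLoop (pmCost ((hi - lo - r).toNat + 1) lo hi r) [.expand lo hi r] []

-- ===== PRECONDITION & SPEC =====
-- Pre_ excludes exactly the inputs on which Python A never returns (unbounded recursion /
-- RecursionError): r ≤ 0 while 2r < hi - lo.
def Pre_pairwise_merge (lo : Int) (hi : Int) (r : Int) : Prop := 0 < r ∨ hi - lo ≤ r * 2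
instance (lo : Int) (hi : Int) (r : Int) : Decidable (Pre_pairwise_merge lo hi r) := by
  unfold Pre_pairwise_merge; infer_instance

def pvWitness_pairwise_merge : Int × Int × Int := (0, 8, 1)

def Spec_pairwise_merge (lo : Int) (hi : Int) (r : Int) (out : List (Int × Int)) : Prop := out = pairwise_merge_alt lo hi r
instance (lo : Int) (hi : Int) (r : Int) (out : List (Int × Int)) : Decidable (Spec_pairwise_merge lo hi r out) := by unfold Spec_pairwise_merge; infer_instance

-- ===== CLAIM (what is proved, stated in full; the proofs are below) =====
def Claim_equal_pairwise_merge : Prop := ∀ (lo : Int) (hi : Int) (r : Int), Dom_pairwise_merge lo hi r → Pre_pairwise_merge lo hi r → Spec_pairwise_merge lo hi r (pairwise_merge lo hi r)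

-- ===== LEMMAS AND PROOFS =====

-- With sufficient depth fuel and a positive step, processing an 'expand' item consumes
-- exactly 'pmCost' loop iterations and appends exactly A's output for that item.
theorem pmLoop_expand :
    ∀ (f : Nat) (a b s : Int), 0 < s → (b - a - s).toNat < f →
      ∀ (L : Nat) (stack : List PmItem) (acc : List (Int × Int)),
        pmLoop (pmCost f a b s + L) (.expand a b s :: stack) acc =
          pmLoop L stack (acc ++ pmA f a b s) := by
  intro f
  induction f with
  | zero => intro a b s _ hm; omega
  | succ f ih =>
    intro a b s hs hm L stack acc
    by_cases h : s * 2 < b - a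
    · rw [pmCost, if_pos h]
      have e1 : pmCost f a b (s * 2) + pmCost f (a + s) (b - s) (s * 2) + 2 + L
          = pmCost f a b (s * 2) + (pmCost f (a + s) (b - s) (s * 2) + (1 + L)) + 1 := by omega
      rw [e1, pmLoop, if_pos h]
      rw [ih a b (s * 2) (by omega) (by omega)]
      rw [ih (a + s) (b - s) (s * 2) (by omega) (by omega)]
      have e2 : (1 + L) = L + 1 := by omega
      rw [e2]
      simp only [pmLoop]
      rw [pmA]
      simp only [if_pos h, List.append_assoc]
    · rw [pmCost, if_neg h, Nat.add_comm 1 L]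
      simp only [pmLoop]
      rw [if_neg h]
      rw [pmA]
      simp only [if_neg h, List.append_nil]

-- ===== VERDICT (by name: the statement is the Claim_ definition above) =====
theorem pairwise_merge_spec : Claim_equal_pairwise_merge := by
  intro lo hi r _ hpre
  unfold Spec_pairwise_merge pairwise_merge pairwise_merge_alt
  rcases hpre with hr | hr
  · have h := pmLoop_expand ((hi - lo - r).toNat + 1) lo hi r hr (by omega) 0 [] []
    rw [Nat.add_zero] at h
    rw [h, pmLoop]
    simp
  · have hg : ¬ r * 2 < hi - lo := by omega
    rw [pmA]
    simp only [if_neg hg]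
    rw [pmCost]
    simp only [if_neg hg]
    rw [pmLoop, if_neg hg, pmLoop]
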